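-- pv_equiv track=rewrite | github.com/HariSekhon/Nagios-Plugins | check_dhcpd_leases.py | sort_keys_by_host
-- ===== SOURCE A (Python) =====
-- def sort_keys_by_host(dictionary):
--     """Takes the address dictionary in the form {"ip":["hostname","mac"]},
--     sorts the keys by the host value, returns an ordered list of keys"""
--
--     hosts = []
--     keys = list(dictionary.keys())
--     keys.sort()
--     keys_sorted = []
--     for key in keys:
--         hosts.append(dictionary[key][0])
--     hosts.sort()
--     for host in hosts:
--         for key in keys:
--             if dictionary[key][0] == host:
--                 keys_sorted.append(key)
--
--     # ((k, v) for k, v in mydict), key=lambda i: i[1])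
--
--     # dedup without losing order
--     keys_sorted2 = []
--     for key in keys_sorted:
--         if key not in keys_sorted2:
--             keys_sorted2.append(key)
--     keys_sorted = keys_sorted2
--
--     return keys_sorted
-- ===== SOURCE B (Python) =====
-- def sort_keys_by_host(dictionary):
--     """Takes the address dictionary mapping each ip key to a [hostname, mac] value,
--     sorts the keys by the host value, returns an ordered list of keys"""
--
--     # inverted index: hostname -> list of ip keys having that hostname
--     buckets = {}
--     for ip, info in dictionary.items():
--         buckets.setdefault(info[0], []).append(ip)
--     keys_sorted = []
--     for host in sorted(buckets):
--         for ip in sorted(buckets[host]):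
--             keys_sorted.append(ip)
--     return keys_sorted
-- ===== Notes on version B (the rewrite author's own statement) =====
-- stated objective: faster
-- what changed: B builds a hostname->ips inverted index in one pass over the items and emits sorted(hosts) x sorted(bucket) groups, replacing A's sort-all-keys, sort-all-hosts-with-duplicates, nested rescan of every key per host occurrence and the final quadratic dedup pass.
import Mathlib
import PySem

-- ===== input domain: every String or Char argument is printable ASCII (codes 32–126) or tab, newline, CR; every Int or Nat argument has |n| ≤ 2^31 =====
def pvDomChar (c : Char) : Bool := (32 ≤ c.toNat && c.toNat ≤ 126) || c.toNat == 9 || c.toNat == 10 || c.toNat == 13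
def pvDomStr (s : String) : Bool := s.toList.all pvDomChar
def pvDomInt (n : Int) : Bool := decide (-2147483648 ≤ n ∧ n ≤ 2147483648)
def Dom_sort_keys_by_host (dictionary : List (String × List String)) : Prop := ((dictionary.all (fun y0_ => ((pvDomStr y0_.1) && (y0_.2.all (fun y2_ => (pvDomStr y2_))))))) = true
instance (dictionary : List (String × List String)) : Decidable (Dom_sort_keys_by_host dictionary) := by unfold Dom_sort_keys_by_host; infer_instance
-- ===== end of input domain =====

-- B replaces A's sort-everything-then-rescan-per-host-then-dedup passes by a single
-- group-by index (hostname -> its ip keys) traversed in sorted host order (objective: alternative).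


-- ===== PORT A =====
-- dictionary[key][0]; Pre_ guarantees the value has a first element, so the "" default is never read
def pvHostOf (d : PySem.Dict String (List String)) (k : String) : String :=
  PySem.List.pyGetD (d.getD k []) 0 ""

def sort_keys_by_host (dictionary : List (String × List String)) : List String :=
  let d := PySem.Dict.ofList dictionary
  let keys := PySem.List.sorted d.keys (fun k => k) false
  let hosts := PySem.List.sorted (keys.foldl (fun acc k => acc ++ [pvHostOf d k]) []) (fun h => h) false
  let keys_sorted := hosts.foldl (fun acc host =>
      keys.foldl (fun acc k => if pvHostOf d k == host then acc ++ [k] else acc) acc) []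
  -- dedup without losing order: 'if key not in keys_sorted2: keys_sorted2.append(key)'
  keys_sorted.foldl PySem.Set.add []

-- ===== PORT B =====
def sort_keys_by_host_alt (dictionary : List (String × List String)) : List String :=
  let d := PySem.Dict.ofList dictionary
  let buckets := d.items.foldl
      (fun b p => b.modify (PySem.List.pyGetD p.2 0 "") [] (fun l => l ++ [p.1]))
      PySem.Dict.empty
  (PySem.List.sorted buckets.keys (fun h => h) false).foldl
    (fun acc host =>
      (PySem.List.sorted (buckets.getD host []) (fun k => k) false).foldl
        (fun acc ip => acc ++ [ip]) acc) []

-- ===== PRECONDITION & SPEC =====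
-- Python A evaluates dictionary[key][0]; it raises IndexError iff some surviving dict value has no first element.
def Pre_sort_keys_by_host (dictionary : List (String × List String)) : Prop :=
  ∀ p ∈ (PySem.Dict.ofList dictionary).items, p.2 ≠ []
instance (dictionary : List (String × List String)) : Decidable (Pre_sort_keys_by_host dictionary) := by
  unfold Pre_sort_keys_by_host; infer_instance

def pvWitness_sort_keys_by_host : (List (String × List String)) :=
  [("10.0.0.2", ["beta", "aa:bb"]), ("10.0.0.1", ["alpha", "cc:dd"])]

def Spec_sort_keys_by_host (dictionary : List (String × List String)) (out : List String) : Prop := out = sort_keys_by_host_alt dictionary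
instance (dictionary : List (String × List String)) (out : List String) : Decidable (Spec_sort_keys_by_host dictionary out) := by unfold Spec_sort_keys_by_host; infer_instance

-- ===== CLAIM (what is proved, stated in full; the proofs are below) =====
def Claim_equal_sort_keys_by_host : Prop := ∀ (dictionary : List (String × List String)), Dom_sort_keys_by_host dictionary → Pre_sort_keys_by_host dictionary → Spec_sort_keys_by_host dictionary (sort_keys_by_host dictionary)

-- ===== LEMMAS AND PROOFS =====

-- set(xs) keeps first occurrences in order, hence is a sublist of xs
theorem pv_ofList_sublist {α : Type} [BEq α] [LawfulBEq α] (xs : List α) :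
    (PySem.Set.ofList xs).Sublist xs := by
  induction xs with
  | nil => simp [PySem.Set.ofList_nil]
  | cons x xs ih =>
      rw [PySem.Set.ofList_cons]
      exact List.Sublist.cons₂ x (List.Sublist.trans List.filter_sublist ih)

theorem pv_pairwise_lt_of_le_nodup {α : Type} [LinearOrder α] {xs : List α}
    (hle : xs.Pairwise (· ≤ ·)) (hnd : xs.Nodup) : xs.Pairwise (· < ·) :=
  (hle.and hnd).imp (fun h => lt_of_le_of_ne h.1 h.2)

-- dedup of a flatMap whose groups are disjoint (each element names its group via f)
-- and internally duplicate-free is the flatMap over the dedup'd group list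
theorem pv_filter_group {α β : Type} [BEq α] [LawfulBEq α] [BEq β] [LawfulBEq β]
    (g : α → List β) (f : β → α) (hmem : ∀ h x, x ∈ g h → f x = h) (h : α) (l : List α) :
    (l.flatMap g).filter (fun y => !PySem.Set.contains (g h) y)
      = (l.filter (fun a => !(a == h))).flatMap g := by
  induction l with
  | nil => rfl
  | cons a l ih =>
      simp only [List.flatMap_cons, List.filter_append, List.filter_cons, ih]
      by_cases hah : a = h
      · rw [hah]
        have hnil : (g h).filter (fun y => !PySem.Set.contains (g h) y) = [] :=
          List.filter_eq_nil_iff.mpr (fun x hx => by simp [PySem.Set.contains_eq_listContains, hx])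
        rw [if_neg (by simp), hnil, List.nil_append]
      · rw [if_pos (by simp [hah]), List.flatMap_cons]
        congr 1
        rw [List.filter_eq_self.mpr]
        intro x hx
        have hxn : x ∉ g h := fun hxe => hah ((hmem a x hx) ▸ (hmem h x hxe) ▸ rfl)
        simp [PySem.Set.contains_eq_listContains, hxn]

theorem pv_ofList_flatMap {α β : Type} [BEq α] [LawfulBEq α] [BEq β] [LawfulBEq β]
    (hs : List α) (g : α → List β) (f : β → α)
    (hmem : ∀ h x, x ∈ g h → f x = h) (hnd : ∀ h, (g h).Nodup) :
    PySem.Set.ofList (hs.flatMap g) = (PySem.Set.ofList hs).flatMap g := by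
  induction hs with
  | nil => rfl
  | cons h hs ih =>
      rw [List.flatMap_cons, PySem.Set.ofList_cons, List.flatMap_cons,
        PySem.Set.ofList_append, PySem.Set.update_eq_append_filter, ih,
        PySem.Set.ofList_eq_self_of_nodup (g h) (hnd h)]
      congr 1
      rw [pv_filter_group g f hmem h]
      rfl

-- abbreviations used by the bridge lemmas (proof-side only)
def pvD (dictionary : List (String × List String)) : PySem.Dict String (List String) :=
  PySem.Dict.ofList dictionary

def pvKeys (dictionary : List (String × List String)) : List String :=
  PySem.List.sorted (pvD dictionary).keys (fun k => k) false

theorem pv_keys_nodup (dictionary : List (String × List String)) :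
    (pvKeys dictionary).Nodup :=
  ((PySem.List.sorted_perm (pvD dictionary).keys (fun k => k) false).nodup_iff).mpr
    (PySem.Dict.nodup_keys_ofList dictionary)

-- on the items of the dict, the A-side host lookup is just the pair's own value
theorem pv_host_items (dictionary : List (String × List String)) :
    ∀ p ∈ (pvD dictionary).items, pvHostOf (pvD dictionary) p.1 = PySem.List.pyGetD p.2 0 "" := by
  intro p hp
  unfold pvHostOf
  rw [PySem.Dict.getD_of_mem_items (pvD dictionary) (k := p.1) (v := p.2) hp
    (PySem.Dict.nodup_keys_ofList dictionary)]

-- Step II: per host, A's filter over the sorted key list IS B's sorted bucket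
theorem pv_group_eq (dictionary : List (String × List String)) (h : String) :
    PySem.List.sorted
        (((pvD dictionary).items.filter (fun p => PySem.List.pyGetD p.2 0 "" == h)).map (fun p => p.1))
        (fun k => k) false
      = (pvKeys dictionary).filter (fun k => pvHostOf (pvD dictionary) k == h) := by
  apply PySem.List.sorted_eq_of_perm_of_pairwise_lt
  · -- permutation
    have h1 : ((pvKeys dictionary).filter (fun k => pvHostOf (pvD dictionary) k == h)).Perm
        ((pvD dictionary).keys.filter (fun k => pvHostOf (pvD dictionary) k == h)) :=
      (PySem.List.sorted_perm (pvD dictionary).keys (fun k => k) false).filter _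
    have h2 : (pvD dictionary).keys.filter (fun k => pvHostOf (pvD dictionary) k == h)
        = ((pvD dictionary).items.filter (fun p => PySem.List.pyGetD p.2 0 "" == h)).map (fun p => p.1) := by
      show ((pvD dictionary).items.map (fun p => p.1)).filter (fun k => pvHostOf (pvD dictionary) k == h) = _
      rw [List.filter_map]
      congr 1
      apply List.filter_congr
      intro p hp
      simp only [Function.comp]
      rw [pv_host_items dictionary p hp]
    exact h2 ▸ h1
  · -- strictly increasing
    apply pv_pairwise_lt_of_le_nodup
    · exact List.Pairwise.sublist List.filter_sublist
        (PySem.List.sorted_pairwise (pvD dictionary).keys (fun k => k))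
    · exact (pv_keys_nodup dictionary).filter _

-- Step I: the dedup'd sorted host list of A IS B's sorted bucket-key set
theorem pv_hosts_eq (dictionary : List (String × List String)) :
    PySem.List.sorted
        (PySem.Set.ofList ((pvD dictionary).items.map (fun p => PySem.List.pyGetD p.2 0 "")))
        (fun h => h) false
      = PySem.Set.ofList
          (PySem.List.sorted
            ((pvKeys dictionary).map (fun k => pvHostOf (pvD dictionary) k)) (fun h => h) false) := by
  apply PySem.List.sorted_eq_of_perm_of_pairwise_lt
  · -- permutation: both are nodup with the same members
    rw [List.perm_ext_iff_of_nodup (PySem.Set.nodup_ofList _) (PySem.Set.nodup_ofList _)]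
    intro a
    rw [PySem.Set.mem_ofList, PySem.Set.mem_ofList, PySem.List.mem_sorted]
    have hmapeq : (pvD dictionary).items.map (fun p => pvHostOf (pvD dictionary) p.1)
        = (pvD dictionary).items.map (fun p => PySem.List.pyGetD p.2 0 "") :=
      List.map_congr_left (pv_host_items dictionary)
    constructor
    · intro ha
      rw [List.mem_map] at ha ⊢
      obtain ⟨k, hk, hka⟩ := ha
      have hk' : k ∈ (pvD dictionary).keys := by
        rw [pvKeys, PySem.List.mem_sorted] at hk; exact hk
      rw [show (pvD dictionary).keys = (pvD dictionary).items.map (fun p => p.1) from rfl,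
        List.mem_map] at hk'
      obtain ⟨p, hp, hpk⟩ := hk'
      exact ⟨p, hp, by rw [← pv_host_items dictionary p hp, hpk, hka]⟩
    · intro ha
      rw [← hmapeq, List.mem_map] at ha
      obtain ⟨p, hp, hpa⟩ := ha
      rw [List.mem_map]
      refine ⟨p.1, ?_, hpa⟩
      rw [pvKeys, PySem.List.mem_sorted]
      exact List.mem_map_of_mem hp
  · -- strictly increasing: a subsequence of a sorted list, without duplicates
    apply pv_pairwise_lt_of_le_nodup
    · exact List.Pairwise.sublist (pv_ofList_sublist _)
        (PySem.List.sorted_pairwise ((pvKeys dictionary).map (fun k => pvHostOf (pvD dictionary) k)) (fun h => h))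
    · exact PySem.Set.nodup_ofList _

-- the bucket built by B's loop, per host
theorem pv_bucket (dictionary : List (String × List String)) (h : String) :
    ((pvD dictionary).items.foldl
        (fun b p => b.modify (PySem.List.pyGetD p.2 0 "") [] (fun l => l ++ [p.1]))
        PySem.Dict.empty).getD h []
      = ((pvD dictionary).items.filter (fun p => PySem.List.pyGetD p.2 0 "" == h)).map (fun p => p.1) := by
  have h1 : (pvD dictionary).items.foldl
        (fun b p => b.modify (PySem.List.pyGetD p.2 0 "") [] (fun l => l ++ [p.1]))
        PySem.Dict.empty
      = ((pvD dictionary).items.map (fun p => (PySem.List.pyGetD p.2 0 "", p.1))).foldl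
          (fun b q => b.modify q.1 [] (fun l => l ++ [q.2])) PySem.Dict.empty :=
    (List.foldl_map (f := fun p : String × List String => (PySem.List.pyGetD p.2 0 "", p.1))
      (g := fun (b : PySem.Dict String (List String)) (q : String × String) =>
        b.modify q.1 [] (fun l => l ++ [q.2]))).symm
  rw [h1, PySem.Dict.getD_foldl_modify_append, PySem.Dict.getD_empty, List.nil_append,
    List.filter_map, List.map_map]
  rfl

-- ===== VERDICT (by name: the statement is the Claim_ definition above) =====
theorem sort_keys_by_host_spec : Claim_equal_sort_keys_by_host := by
  intro dictionary _ _
  unfold Spec_sort_keys_by_host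
  simp only [sort_keys_by_host, sort_keys_by_host_alt]
  -- A side: loops -> map / filter / flatMap / set
  rw [PySem.List.foldl_append_singleton_eq_map (fun k => pvHostOf (PySem.Dict.ofList dictionary) k)]
  simp only [PySem.List.foldl_append_if_eq_filter, List.nil_append]
  rw [show (fun (acc : List String) (host : String) =>
        acc ++ (PySem.List.sorted (PySem.Dict.ofList dictionary).keys (fun k => k) false).filter
          (fun k => pvHostOf (PySem.Dict.ofList dictionary) k == host))
      = (fun acc host => acc ++ (fun host => (PySem.List.sorted (PySem.Dict.ofList dictionary).keys (fun k => k) false).filter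
          (fun k => pvHostOf (PySem.Dict.ofList dictionary) k == host)) host) from rfl,
    PySem.List.foldl_append_eq_flatMap, List.nil_append,
    ← PySem.Set.ofList_eq_foldl]
  have hd : PySem.Dict.ofList dictionary = pvD dictionary := rfl
  rw [hd]
  have hk : PySem.List.sorted (pvD dictionary).keys (fun k => k) false = pvKeys dictionary := rfl
  rw [hk]
  -- A side: push the dedup through the (disjoint, duplicate-free) host groups
  rw [pv_ofList_flatMap _ _ (pvHostOf (pvD dictionary))
    (fun h x hx => eq_of_beq (List.mem_filter.mp hx).2)
    (fun h => (pv_keys_nodup dictionary).filter _)]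
  rw [← pv_hosts_eq dictionary]
  -- B side: the bucket index -> its keys as a set, its buckets as filters
  rw [PySem.Dict.keys_foldl_modify_key (pvD dictionary).items
    (fun p => PySem.List.pyGetD p.2 0 "") [] (fun _ p => fun l => l ++ [p.1]) PySem.Dict.empty]
  simp only [PySem.Dict.keys_empty, PySem.Set.update_nil_left, pv_bucket,
    PySem.List.foldl_append_singleton_eq_self]
  rw [PySem.List.foldl_append_eq_flatMap, List.nil_append]
  -- same sorted host list on both sides; the groups coincide host by host
  exact List.flatMap_congr (fun h _ => (pv_group_eq dictionary h).symm)
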